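-- pv_equiv track=rewrite | github.com/tanmayidev/dsa-solutions | freecodecamp/daily-code-challenge/2026-03-05.py | smallest_gap
-- ===== SOURCE A (Python) =====
-- def smallest_gap(s):
--     last_seen = {}
--     min_gap = float('inf')
--     result = ""
--
--     for i, char in enumerate(s):
--         if char in last_seen:
--             gap = i - last_seen[char] - 1
--
--             if gap < min_gap:
--                 min_gap = gap
--                 result = s[last_seen[char] + 1:i]
--
--         last_seen[char] = i
--
--     return result
-- ===== SOURCE B (Python) =====
-- def smallest_gap(s):
--     # Different strategy: per-position backward scan for the previous occurrence,
--     # collect (gap, second_index) candidates, pick the lexicographic minimum.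
--     def prev_occ(i):
--         for j in range(i - 1, -1, -1):
--             if s[j] == s[i]:
--                 return j
--         return -1
--
--     cands = []
--     for i in range(len(s)):
--         j = prev_occ(i)
--         if j != -1:
--             cands.append((i - j - 1, i))
--     if not cands:
--         return ""
--     gap, i2 = min(cands)
--     return s[prev_occ(i2) + 1:i2]
-- ===== Notes on version B (the rewrite author's own statement) =====
-- stated objective: alternative
-- what changed: Replaces A's single forward pass with a last-seen dictionary and running strict-minimum by a per-position backward scan for the previous occurrence, collecting (gap, second-index) candidate pairs and taking their lexicographic minimum with min(), recomputing the substring from the winning index.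
import Mathlib
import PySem

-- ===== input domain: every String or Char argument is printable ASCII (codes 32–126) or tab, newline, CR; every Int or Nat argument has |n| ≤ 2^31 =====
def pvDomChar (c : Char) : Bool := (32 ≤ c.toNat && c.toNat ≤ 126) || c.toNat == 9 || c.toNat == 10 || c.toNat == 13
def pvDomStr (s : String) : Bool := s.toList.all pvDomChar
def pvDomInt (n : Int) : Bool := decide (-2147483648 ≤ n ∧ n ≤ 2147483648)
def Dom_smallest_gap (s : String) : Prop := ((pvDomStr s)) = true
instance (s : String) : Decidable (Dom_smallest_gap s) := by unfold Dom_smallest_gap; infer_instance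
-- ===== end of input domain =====

-- B replaces A's single-pass last-seen dictionary by a per-position backward scan that
-- collects (gap, second-index) candidates and takes their lexicographic minimum (alternative
-- decomposition, same results).

-- ===== PORT A =====
-- literal port of A: one pass with a last-seen dict, strict improvement of the minimal gap
def smallest_gap (s : String) : String :=
  let cs := s.toList
  let fin :=
    (PySem.List.enumerate cs 0).foldl
      (fun (st : PySem.Dict Char Int × Option Int × List Char) (p : Int × Char) =>
        match st.1.get? p.2 with
        | some prev =>
            let gap := p.1 - prev - 1
            let nb : Option Int × List Char :=
              match st.2.1 with
              | none => (some gap, PySem.List.slice cs (some (prev + 1)) (some p.1))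
              | some m =>
                  if gap < m then (some gap, PySem.List.slice cs (some (prev + 1)) (some p.1))
                  else st.2
            (st.1.insert p.2 p.1, nb)
        | none => (st.1.insert p.2 p.1, st.2))
      (PySem.Dict.empty, none, [])
  String.ofList fin.2.2

-- ===== PORT B =====
-- helper of B: prev_occ — scan backwards from i-1 for the previous occurrence of s[i]
def pvPrevScan (cs : List Char) (c : Char) : Nat → Int
  | 0 => -1
  | j + 1 => if cs.getD j ' ' = c then (j : Int) else pvPrevScan cs c j

def pvPrevOcc (cs : List Char) (i : Nat) : Int := pvPrevScan cs (cs.getD i ' ') i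

def smallest_gap_alt (s : String) : String :=
  let cs := s.toList
  let cands :=
    (List.range cs.length).foldl
      (fun (acc : List (Int × Int)) (i : Nat) =>
        let j := pvPrevOcc cs i
        if j ≠ -1 then acc ++ [((i : Int) - j - 1, (i : Int))] else acc)
      []
  match PySem.List.min2? cands (·.1) (·.2) with
  | none => ""
  | some gi =>
      String.ofList (PySem.List.slice cs (some (pvPrevOcc cs gi.2.toNat + 1)) (some gi.2))

-- ===== PRECONDITION & SPEC =====
def Spec_smallest_gap (s : String) (out : String) : Prop := out = smallest_gap_alt s
instance (s : String) (out : String) : Decidable (Spec_smallest_gap s out) := by unfold Spec_smallest_gap; infer_instance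

-- ===== CLAIM (what is proved, stated in full; the proofs are below) =====
def Claim_equal_smallest_gap : Prop := ∀ (s : String), Dom_smallest_gap s → Spec_smallest_gap s (smallest_gap s)

-- ===== LEMMAS AND PROOFS =====

-- A's loop body, named (definitionally the lambda inside smallest_gap)
def pvStepA (cs : List Char) (st : PySem.Dict Char Int × Option Int × List Char)
    (p : Int × Char) : PySem.Dict Char Int × Option Int × List Char :=
  match st.1.get? p.2 with
  | some prev =>
      let gap := p.1 - prev - 1
      let nb : Option Int × List Char :=
        match st.2.1 with
        | none => (some gap, PySem.List.slice cs (some (prev + 1)) (some p.1))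
        | some m =>
            if gap < m then (some gap, PySem.List.slice cs (some (prev + 1)) (some p.1))
            else st.2
      (st.1.insert p.2 p.1, nb)
  | none => (st.1.insert p.2 p.1, st.2)

-- the candidate produced at index i (if any), and the slice a candidate denotes
def pvFn (cs : List Char) (i : Nat) : Option (Int × Int) :=
  if pvPrevOcc cs i = -1 then none else some ((i : Int) - pvPrevOcc cs i - 1, (i : Int))

def pvSl (cs : List Char) (x : Int × Int) : List Char :=
  PySem.List.slice cs (some (x.2 - x.1)) (some x.2)

-- A's (min_gap, result) update expressed on candidates
def pvUpd (cs : List Char) (b : Option Int × List Char) (x : Int × Int) :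
    Option Int × List Char :=
  match b.1 with
  | none => (some x.1, pvSl cs x)
  | some m => if x.1 < m then (some x.1, pvSl cs x) else b

def pvStepB (cs : List Char) (b : Option Int × List Char) (i : Nat) :
    Option Int × List Char :=
  match pvFn cs i with
  | none => b
  | some x => pvUpd cs b x

-- strict-improvement champion rule (A's tie-breaking: keep the earlier candidate)
def pvRule (m x : Int × Int) : Int × Int := if x.1 < m.1 then x else m

def pvEnc (v : Int) : Option Int := if v = -1 then none else some v

lemma pv_gapA_eq (s : String) :
    smallest_gap s =
      String.ofList (((PySem.List.enumerate s.toList 0).foldl (pvStepA s.toList)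
        (PySem.Dict.empty, none, [])).2.2) := rfl

lemma pv_gapB_eq (s : String) :
    smallest_gap_alt s =
      (match PySem.List.min2?
          ((List.range s.toList.length).foldl
            (fun (acc : List (Int × Int)) (i : Nat) =>
              let j := pvPrevOcc s.toList i
              if j ≠ -1 then acc ++ [((i : Int) - j - 1, (i : Int))] else acc)
            [])
          (·.1) (·.2) with
      | none => ""
      | some gi =>
          String.ofList (PySem.List.slice s.toList
            (some (pvPrevOcc s.toList gi.2.toNat + 1)) (some gi.2))) := rfl

-- B's candidate loop is a filterMap
lemma pv_cands_eq (cs : List Char) :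
    ∀ (L : List Nat) (acc : List (Int × Int)),
      L.foldl
        (fun (acc : List (Int × Int)) (i : Nat) =>
          let j := pvPrevOcc cs i
          if j ≠ -1 then acc ++ [((i : Int) - j - 1, (i : Int))] else acc) acc
        = acc ++ L.filterMap (pvFn cs) := by
  intro L
  induction L with
  | nil => intro acc; simp
  | cons i L ih =>
    intro acc
    simp only [List.foldl_cons, List.filterMap_cons]
    rw [ih]
    by_cases h : pvPrevOcc cs i = -1
    · simp [h, pvFn]
    · simp [h, pvFn]

-- one step of A's loop, the dict read replaced by the backward scan
lemma pv_stepA_eq (cs : List Char) (k : Nat) (ch : Char) (d : PySem.Dict Char Int)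
    (b : Option Int × List Char)
    (hd : ∀ c, d.get? c = pvEnc (pvPrevScan cs c k))
    (hch : cs.getD k ' ' = ch) :
    pvStepA cs (d, b) ((k : Int), ch) = (d.insert ch (k : Int), pvStepB cs b k) := by
  have hget : d.get? ch = pvEnc (pvPrevOcc cs k) := by rw [hd ch, pvPrevOcc, hch]
  unfold pvStepA pvStepB pvFn
  by_cases h : pvPrevOcc cs k = -1
  · rw [show d.get? ch = none by rw [hget, pvEnc, if_pos h]]
    simp [h]
  · rw [show d.get? ch = some (pvPrevOcc cs k) by rw [hget, pvEnc, if_neg h]]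
    simp only [if_neg h, pvUpd]
    have harith : (k : Int) - ((k : Int) - pvPrevOcc cs k - 1) = pvPrevOcc cs k + 1 := by ring
    cases hb : b.1 with
    | none => simp [pvSl, harith]
    | some m => by_cases hlt : (k : Int) - pvPrevOcc cs k - 1 < m <;> simp [pvSl, harith, hlt]

-- the dict invariant survives one insertion
lemma pv_dict_step (cs : List Char) (k : Nat) (ch : Char) (d : PySem.Dict Char Int)
    (hd : ∀ c, d.get? c = pvEnc (pvPrevScan cs c k))
    (hch : cs.getD k ' ' = ch) :
    ∀ c, (d.insert ch (k : Int)).get? c = pvEnc (pvPrevScan cs c (k + 1)) := by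
  intro c
  rw [PySem.Dict.get?_insert, show pvPrevScan cs c (k + 1)
      = if cs.getD k ' ' = c then (k : Int) else pvPrevScan cs c k from rfl, hch]
  by_cases h : c = ch
  · subst h
    rw [if_pos rfl, if_pos rfl, pvEnc, if_neg (by omega)]
  · rw [if_neg h, if_neg (fun hh => h hh.symm), hd c]

-- A's fold, with the dict eliminated in favour of the backward scan
lemma pv_A_loop (cs : List Char) :
    ∀ (l : List Char) (k : Nat) (d : PySem.Dict Char Int) (b : Option Int × List Char),
      (∀ c, d.get? c = pvEnc (pvPrevScan cs c k)) →
      cs.drop k = l →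
      ((PySem.List.enumerate l (k : Int)).foldl (pvStepA cs) (d, b)).2
        = (List.range' k l.length).foldl (pvStepB cs) b := by
  intro l
  induction l with
  | nil => intro k d b _ _; simp [PySem.List.enumerate_nil]
  | cons ch t ih =>
    intro k d b hd hdrop
    have hch : cs.getD k ' ' = ch := by
      have h1 : (cs.drop k)[0]? = cs[k + 0]? := List.getElem?_drop
      rw [hdrop] at h1
      have h0 : cs[k]? = some ch := by simpa using h1.symm
      simp [List.getD_eq_getElem?_getD, h0]
    have hdrop' : cs.drop (k + 1) = t := by
      have h2 : cs.drop (k + 1) = (cs.drop k).drop 1 := by rw [List.drop_drop]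
      rw [h2, hdrop]
      rfl
    rw [PySem.List.enumerate_cons, List.length_cons, List.range'_succ,
      List.foldl_cons, List.foldl_cons, pv_stepA_eq cs k ch d b hd hch,
      show ((k : Int) + 1) = ((k + 1 : Nat) : Int) by push_cast; ring]
    exact ih (k + 1) _ (pvStepB cs b k) (pv_dict_step cs k ch d hd hch) hdrop'

-- folding pvStepB is folding pvUpd over the filterMap
lemma pv_stepB_filterMap (cs : List Char) :
    ∀ (L : List Nat) (b : Option Int × List Char),
      L.foldl (pvStepB cs) b = (L.filterMap (pvFn cs)).foldl (pvUpd cs) b := by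
  intro L
  induction L with
  | nil => intro b; simp
  | cons i L ih =>
    intro b
    simp only [List.foldl_cons, List.filterMap_cons, pvStepB]
    cases h : pvFn cs i with
    | none => simp [ih]
    | some x => simp [ih]

-- folding pvUpd from a champion state follows pvRule
lemma pv_upd_fold (cs : List Char) :
    ∀ (t : List (Int × Int)) (x : Int × Int),
      t.foldl (pvUpd cs) (some x.1, pvSl cs x)
        = (some (t.foldl pvRule x).1, pvSl cs (t.foldl pvRule x)) := by
  intro t
  induction t with
  | nil => intro x; simp
  | cons c t ih =>
    intro x
    simp only [List.foldl_cons]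
    by_cases h : c.1 < x.1
    · rw [show pvUpd cs (some x.1, pvSl cs x) c = (some c.1, pvSl cs c) by simp [pvUpd, h],
        show pvRule x c = c by simp [pvRule, h], ih]
    · rw [show pvUpd cs (some x.1, pvSl cs x) c = (some x.1, pvSl cs x) by simp [pvUpd, h],
        show pvRule x c = x by simp [pvRule, h], ih]

lemma pv_rule_mem : ∀ (t : List (Int × Int)) (x : Int × Int),
    t.foldl pvRule x ∈ x :: t := by
  intro t
  induction t with
  | nil => intro x; simp
  | cons c t ih =>
    intro x
    simp only [List.foldl_cons]
    rcases List.mem_cons.1 (ih (pvRule x c)) with h | h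
    · rw [h]; unfold pvRule; split <;> simp
    · simp [h]

-- Python min over pairs equals the strict-improvement champion when second
-- components are strictly increasing (A's tie-break = smallest second index)
lemma pv_min2_eq_rule :
    ∀ (t : List (Int × Int)) (x : Int × Int),
      (∀ c ∈ t, x.2 < c.2) → t.Pairwise (fun a b => a.2 < b.2) →
      PySem.List.min2? (x :: t) (fun p => p.1) (fun p => p.2)
        = some (t.foldl pvRule x) := by
  intro t
  induction t with
  | nil => intro x _ _; simp [PySem.List.min2?]
  | cons c t ih =>
    intro x hx hp
    have hxc : x.2 < c.2 := hx c (by simp)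
    have hnc : ¬ c.2 < x.2 := by omega
    rcases List.pairwise_cons.1 hp with ⟨hc, hp2⟩
    have hstep : PySem.List.min2? (x :: c :: t) (fun p => p.1) (fun p => p.2)
        = PySem.List.min2? (pvRule x c :: t) (fun p => p.1) (fun p => p.2) := by
      simp only [PySem.List.min2?, List.foldl_cons]
      congr 1
      by_cases h : c.1 < x.1 <;> simp [pvRule, h, hnc]
    rw [hstep, List.foldl_cons]
    refine ih (pvRule x c) (fun e he => ?_) hp2
    unfold pvRule
    split
    · exact hc e he
    · exact lt_trans hxc (hc e he)

-- every candidate is (i - prevOcc i - 1, i) with prevOcc i ≠ -1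
lemma pv_fn_shape (cs : List Char) (i : Nat) (x : Int × Int) (h : pvFn cs i = some x) :
    pvPrevOcc cs i ≠ -1 ∧ x = ((i : Int) - pvPrevOcc cs i - 1, (i : Int)) := by
  unfold pvFn at h
  split at h
  · exact absurd h (by simp)
  · exact ⟨by assumption, by injection h with h; exact h.symm⟩

-- candidates have strictly increasing second components
lemma pv_cands_pairwise (cs : List Char) (n : Nat) :
    ((List.range n).filterMap (pvFn cs)).Pairwise (fun a b => a.2 < b.2) := by
  rw [List.pairwise_filterMap]
  refine List.Pairwise.imp ?_ (List.pairwise_lt_range)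
  intro i j hij x hx y hy
  rcases pv_fn_shape cs i x hx with ⟨_, hxv⟩
  rcases pv_fn_shape cs j y hy with ⟨_, hyv⟩
  rw [hxv, hyv]
  show (i : Int) < (j : Int)
  exact_mod_cast hij

-- a candidate's slice is the slice B recomputes from its second index
lemma pv_sl_of_mem (cs : List Char) (n : Nat) (y : Int × Int)
    (hy : y ∈ (List.range n).filterMap (pvFn cs)) :
    pvSl cs y = PySem.List.slice cs (some (pvPrevOcc cs y.2.toNat + 1)) (some y.2) := by
  rcases List.mem_filterMap.1 hy with ⟨i, _, hfn⟩
  rcases pv_fn_shape cs i y hfn with ⟨_, hyv⟩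
  have h2 : y.2 = (i : Int) := by rw [hyv]
  have h1 : y.1 = (i : Int) - pvPrevOcc cs i - 1 := by rw [hyv]
  have htn : y.2.toNat = i := by rw [h2]; exact Int.toNat_natCast i
  unfold pvSl
  rw [htn, h2, h1]
  congr 2
  ring

-- ===== VERDICT (by name: the statement is the Claim_ definition above) =====
theorem smallest_gap_spec : Claim_equal_smallest_gap := by
  intro s _
  unfold Spec_smallest_gap
  rw [pv_gapA_eq, pv_gapB_eq]
  have hA := pv_A_loop s.toList s.toList 0 PySem.Dict.empty (none, [])
    (fun c => by rw [PySem.Dict.get?_empty]; rfl) (by simp)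
  rw [show ((0 : Nat) : Int) = (0 : Int) by simp] at hA
  rw [show (((PySem.List.enumerate s.toList 0).foldl (pvStepA s.toList)
        (PySem.Dict.empty, none, [])).2.2 : List Char)
      = ((PySem.List.enumerate s.toList 0).foldl (pvStepA s.toList)
        (PySem.Dict.empty, (none, []))).2.2 from rfl, hA,
    show List.range' 0 s.toList.length = List.range s.toList.length from
      (List.range_eq_range').symm,
    pv_stepB_filterMap, pv_cands_eq, List.nil_append]
  have hpw := pv_cands_pairwise s.toList s.toList.length
  cases hC : (List.range s.toList.length).filterMap (pvFn s.toList) with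
  | nil => rfl
  | cons x t =>
    rw [hC] at hpw
    rcases List.pairwise_cons.1 hpw with ⟨hx, hp⟩
    have hmin : PySem.List.min2? (x :: t) (·.1) (·.2) = some (t.foldl pvRule x) := by
      exact pv_min2_eq_rule t x hx hp
    rw [List.foldl_cons, show pvUpd s.toList (none, []) x = (some x.1, pvSl s.toList x)
        from rfl, pv_upd_fold, hmin]
    have hmem : t.foldl pvRule x ∈ (List.range s.toList.length).filterMap (pvFn s.toList) := by
      rw [hC]; exact pv_rule_mem t x
    rw [pv_sl_of_mem s.toList s.toList.length _ hmem]
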